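-- pv_equiv track=rewrite | github.com/mylvoh0714/BOJ | 1038(f).py | Check
-- ===== SOURCE A (Python) =====
-- def Check(num):
--     temp = -1
--     while(num > 0):
--         if temp < num % 10:
--             temp = num % 10
--         else :
--             return False
--         num //= 10
--     return True
-- ===== SOURCE B (Python) =====
-- def Check(num):
--     if num <= 0:
--         return True
--     s = str(num)
--     return all(x > y for x, y in zip(s, s[1:]))
-- ===== Notes on version B (the rewrite author's own statement) =====
-- stated objective: idiomatic
-- what changed: B replaces A's LSB-first arithmetic digit extraction (mod/floordiv loop with a running max accumulator and early return) by building the decimal string once and checking all adjacent character pairs MSB-first with zip/all.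
import Mathlib
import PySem

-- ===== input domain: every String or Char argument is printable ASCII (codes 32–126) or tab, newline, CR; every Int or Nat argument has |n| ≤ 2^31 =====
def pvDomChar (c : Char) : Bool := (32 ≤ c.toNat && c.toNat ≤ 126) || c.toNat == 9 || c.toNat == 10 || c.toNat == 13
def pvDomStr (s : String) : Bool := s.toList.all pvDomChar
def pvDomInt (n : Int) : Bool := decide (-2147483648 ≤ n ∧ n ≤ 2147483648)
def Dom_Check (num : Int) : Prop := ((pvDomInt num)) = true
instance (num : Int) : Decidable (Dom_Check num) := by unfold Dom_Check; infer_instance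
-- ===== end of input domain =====

-- B builds the decimal string once and checks adjacent pairs MSB-first (zip/all), instead of A's LSB-first mod/floordiv loop with a running accumulator; same cost, more idiomatic.


-- ===== PORT A =====
-- the while loop of A: state is (num, temp)
def checkLoop (num temp : Int) : Bool :=
  if 0 < num then
    if temp < PySem.Int.mod num 10 then
      checkLoop (PySem.Int.floordiv num 10) (PySem.Int.mod num 10)
    else false
  else true
termination_by num.toNat
decreasing_by
  rename_i h _
  rw [PySem.Int.floordiv_eq_ediv_of_pos (by norm_num : (0:Int) < 10)]
  omega

def Check (num : Int) : Bool := checkLoop num (-1)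

-- ===== PORT B =====
-- str(num) ported as PySem.Int.toChars (the List Char form of PySem.Int.toStr);
-- zip(s, s[1:]) as s.zip (s.drop 1); all(x > y …) as List.all with x > y, i.e. y < x
def Check_alt (num : Int) : Bool :=
  if num ≤ 0 then true
  else
    let s := PySem.Int.toChars num
    (s.zip (s.drop 1)).all fun p => decide (p.2 < p.1)

-- ===== PRECONDITION & SPEC =====
def Spec_Check (num : Int) (out : Bool) : Prop := out = Check_alt num
instance (num : Int) (out : Bool) : Decidable (Spec_Check num out) := by unfold Spec_Check; infer_instance

-- ===== CLAIM (what is proved, stated in full; the proofs are below) =====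
def Claim_equal_Check : Prop := ∀ (num : Int), Dom_Check num → Spec_Check num (Check num)

-- ===== LEMMAS AND PROOFS =====

-- A's loop over the base-10 digit list (LSB first)
def chainCheck : List Nat → Int → Bool
  | [], _ => true
  | d :: ds, t => if t < (d : Int) then chainCheck ds d else false

theorem checkLoop_eq_chainCheck :
    ∀ (k : Nat) (n t : Int), n.toNat ≤ k →
      checkLoop n t = chainCheck (Nat.digits 10 n.toNat) t := by
  intro k
  induction k with
  | zero =>
    intro n t hk
    have hn : ¬ 0 < n := by omega
    rw [checkLoop, if_neg hn]
    have : n.toNat = 0 := by omega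
    rw [this]
    rfl
  | succ k ih =>
    intro n t hk
    by_cases hn : 0 < n
    · rw [checkLoop, if_pos hn]
      have h10 : (0:Int) < 10 := by norm_num
      have hmod : PySem.Int.mod n 10 = ((n.toNat % 10 : Nat) : Int) := by
        rw [PySem.Int.mod_eq_emod_of_pos h10]
        omega
      have hdiv : PySem.Int.floordiv n 10 = ((n.toNat / 10 : Nat) : Int) := by
        rw [PySem.Int.floordiv_eq_ediv_of_pos h10]
        omega
      have hpos : 0 < n.toNat := by omega
      rw [Nat.digits_def' (by norm_num : 1 < 10) hpos]
      rw [chainCheck, hmod, hdiv]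
      by_cases ht : t < ((n.toNat % 10 : Nat) : Int)
      · rw [if_pos ht, if_pos ht]
        have := ih ((n.toNat / 10 : Nat) : Int) ((n.toNat % 10 : Nat) : Int) (by omega)
        rwa [Int.toNat_natCast] at this
      · rw [if_neg ht, if_neg ht]
    · rw [checkLoop, if_neg hn]
      have : n.toNat = 0 := by omega
      rw [this]
      rfl

theorem chainCheck_iff :
    ∀ (l : List Nat) (t : Int),
      chainCheck l t = true ↔
        ((∀ d ∈ l.head?, t < (d : Int)) ∧ List.IsChain (· < ·) l) := by
  intro l
  induction l with
  | nil =>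
    intro t
    simp [chainCheck]
  | cons d ds ih =>
    intro t
    rw [chainCheck]
    by_cases ht : t < (d : Int)
    · rw [if_pos ht, ih d]
      cases ds with
      | nil =>
        simp [ht]
      | cons e es =>
        rw [List.isChain_cons_cons]
        simp only [List.head?_cons, Option.mem_def, Option.some.injEq, forall_eq']
        constructor
        · rintro ⟨h1, h2⟩
          exact ⟨ht, by exact_mod_cast h1, h2⟩
        · rintro ⟨_, h1, h2⟩
          exact ⟨by exact_mod_cast h1, h2⟩
    · rw [if_neg ht]
      simp only [List.head?_cons, Option.mem_def, Option.some.injEq, forall_eq']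
      constructor
      · intro h; exact (Bool.false_ne_true h).elim
      · intro h; exact absurd h.1 ht

theorem chainCheck_neg_one (l : List Nat) :
    chainCheck l (-1) = true ↔ List.IsChain (· < ·) l := by
  rw [chainCheck_iff]
  constructor
  · exact fun h => h.2
  · intro h
    refine ⟨?_, h⟩
    intro d _
    have : (0:Int) ≤ (d:Int) := Int.natCast_nonneg d
    omega

theorem zip_all_iff_chain (cs : List Char) :
    (((cs.zip (cs.drop 1)).all fun p => decide (p.2 < p.1)) = true) ↔
      List.IsChain (fun a b => b < a) cs := by
  induction cs with
  | nil => simp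
  | cons a t ih =>
    cases t with
    | nil => simp
    | cons b u =>
      rw [List.isChain_cons_cons]
      simp only [List.drop_succ_cons, List.drop_zero, List.zip_cons_cons, List.all_cons,
        Bool.and_eq_true, decide_eq_true_eq]
      rw [← ih]
      simp

-- digitChar is order-preserving on digits
theorem digitChar_lt_iff (a b : Nat) (ha : a < 10) (hb : b < 10) :
    (Nat.digitChar a < Nat.digitChar b ↔ a < b) := by
  have H : ∀ a b : Fin 10, (Nat.digitChar a < Nat.digitChar b ↔ (a : Nat) < b) := by decide
  exact H ⟨a, ha⟩ ⟨b, hb⟩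

-- Nat.toDigits is the reversed digitChar image of Nat.digits (positive case)
theorem toDigitsCore_eq :
    ∀ (f m : Nat) (acc : List Char), 0 < m → m < f →
      Nat.toDigitsCore 10 f m acc =
        ((Nat.digits 10 m).map Nat.digitChar).reverse ++ acc := by
  intro f
  induction f with
  | zero => intro m acc h1 h2; omega
  | succ f ih =>
    intro m acc h1 h2
    simp only [Nat.toDigitsCore]
    by_cases hq : m / 10 = 0
    · rw [if_pos hq]
      have hm10 : m < 10 := by omega
      rw [Nat.digits_def' (by norm_num : 1 < 10) h1, Nat.div_eq_of_lt hm10,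
        Nat.mod_eq_of_lt hm10]
      simp
    · rw [if_neg hq]
      rw [ih (m / 10) _ (by omega) (by omega)]
      rw [Nat.digits_def' (by norm_num : 1 < 10) h1]
      simp

theorem toDigits_eq (m : Nat) (hm : 0 < m) :
    Nat.toDigits 10 m = ((Nat.digits 10 m).map Nat.digitChar).reverse := by
  rw [Nat.toDigits, toDigitsCore_eq (m + 1) m [] hm (by omega)]
  simp

-- ===== VERDICT (by name: the statement is the Claim_ definition above) =====
theorem Check_spec : Claim_equal_Check := by
  intro num _
  unfold Spec_Check Check Check_alt
  by_cases h : num ≤ 0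
  · rw [if_pos h, checkLoop, if_neg (by omega)]
  · rw [if_neg h]
    have htn : 0 < num.toNat := by omega
    have hchars : PySem.Int.toChars num =
        ((Nat.digits 10 num.toNat).map Nat.digitChar).reverse := by
      rw [PySem.Int.toChars, if_neg (by omega), toDigits_eq num.toNat htn]
    rw [checkLoop_eq_chainCheck num.toNat num (-1) le_rfl, hchars, Bool.eq_iff_iff,
      chainCheck_neg_one, zip_all_iff_chain, List.isChain_reverse, List.isChain_map]
    exact (List.IsChain.iff_of_mem_imp fun a b ha hb =>
      digitChar_lt_iff a b (Nat.digits_lt_base (by norm_num) ha)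
        (Nat.digits_lt_base (by norm_num) hb)).symm
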